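-- pv_equiv track=rewrite | github.com/dasomahn/codingtest | codingtest/누진세 절약.py | solution
-- ===== SOURCE A (Python) =====
-- def getCost(arr):
--     cost = 0
--     for i in range(len(arr)):
--         if arr[i]: # 보일러 켜진 날
--             if i == 0:
--                cost += 1
--             else:
--                 arr[i] += arr[i-1]
--                 cost += arr[i] # 누진세 계산
--
--     return cost
--
-- def solution(boiler):
--     ori = boiler.copy()
--     ori_cost = getCost(boiler)
--
--     min_day, min_cost = 0, ori_cost
--
--     day = 0
--     while day < len(boiler):
--         pos = ori[:day] + [1 if not a else 0 for a in ori[day:]]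
--         cost = getCost(pos)
--
--         if min_cost > cost:
--             min_day = day
--             min_cost = cost
--
--         day += 1
--
--     return min_day+1 if min_cost != ori_cost else -1
-- ===== SOURCE B (Python) =====
-- def solution(boiler):
--     # Backward pass: for each day, (r, s) = (length of the zero-run starting there,
--     # cost of the inverted suffix computed with zero incoming carry).
--     suf = []
--     r = s = 0
--     for a in reversed(boiler):
--         if a == 0:
--             s += 1 + r
--             r += 1
--         else:
--             r = 0
--         suf.append((r, s))
--     suf.reverse()
--     # Forward pass: p = progressive cost of the untouched prefix, v = its carry;
--     # the cost of flipping from `day` on is p + s + v * r (carry enters the first run linearly).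
--     p = v = 0
--     best = None
--     for day, (a, (r, s)) in enumerate(zip(boiler, suf)):
--         cost = p + s + v * r
--         if best is None or cost < best[1]:
--             best = (day, cost)
--         if a:
--             v = a if day == 0 else a + v
--             p += 1 if day == 0 else v
--         else:
--             v = 0
--     if best is not None and best[1] < p:
--         return best[0] + 1
--     return -1
-- ===== Notes on version B (the rewrite author's own statement) =====
-- stated objective: faster
-- what changed: Instead of rebuilding every flipped list and rescanning it (O(n) per candidate day), B precomputes in one backward pass the cost and leading zero-run of each inverted suffix, then one forward pass maintains the prefix cost and its carry, getting each day's total in O(1) as prefix + suffix + carry*run.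
import Mathlib
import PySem

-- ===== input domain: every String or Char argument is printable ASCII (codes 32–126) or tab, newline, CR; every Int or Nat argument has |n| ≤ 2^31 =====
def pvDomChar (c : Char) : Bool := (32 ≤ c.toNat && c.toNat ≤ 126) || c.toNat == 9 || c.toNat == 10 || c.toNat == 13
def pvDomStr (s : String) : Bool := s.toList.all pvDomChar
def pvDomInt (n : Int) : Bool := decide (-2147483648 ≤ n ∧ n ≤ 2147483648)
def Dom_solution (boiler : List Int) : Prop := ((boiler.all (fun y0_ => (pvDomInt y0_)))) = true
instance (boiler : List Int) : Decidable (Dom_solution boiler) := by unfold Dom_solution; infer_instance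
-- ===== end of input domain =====

-- B replaces A's O(n^2) rescan of every flipped suffix by one backward and one forward
-- pass (O(n)); equivalence is about the RETURN value only (Python A mutates `boiler` in
-- place via getCost, B does not).

-- ===== PORT A =====
-- getCost's loop: after index 0, step i reads only arr[i-1]'s (possibly mutated) value,
-- carried here as `prev`; `cost` is the running total.  Exact same values as Python A.
def getCostGo : List Int → Int → Int → Int
  | [], _, cost => cost
  | x :: xs, prev, cost =>
    if x ≠ 0 then getCostGo xs (x + prev) (cost + (x + prev))
    else getCostGo xs x cost

def getCost : List Int → Int
  | [] => 0
  | a :: rest => getCostGo rest a (if a ≠ 0 then 1 else 0)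

-- pos = ori[:day] + [1 if not a else 0 for a in ori[day:]]
def posA (ori : List Int) (day : Nat) : List Int :=
  ori.take day ++ (ori.drop day).map (fun a => if a = 0 then 1 else 0)

-- the `while day < len(boiler)` loop, state = (min_day, min_cost)
def aLoop (ori : List Int) (day : Nat) (st : Nat × Int) : Nat × Int :=
  if day < ori.length then
    let cost := getCost (posA ori day)
    aLoop ori (day + 1) (if cost < st.2 then (day, cost) else st)
  else st
termination_by ori.length - day

def solution (boiler : List Int) : Int :=
  let ori_cost := getCost boiler
  let st := aLoop boiler 0 (0, ori_cost)
  if st.2 ≠ ori_cost then (st.1 : Int) + 1 else -1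

-- ===== PORT B =====
-- backward pass of Source B: list of (r, s) per day (built right-to-left, as in Source B)
def sufList : List Int → List (Int × Int)
  | [] => []
  | a :: xs =>
    let t := sufList xs
    let rs := t.headD (0, 0)
    (if a = 0 then (rs.1 + 1, rs.2 + 1 + rs.1) else (0, rs.2)) :: t

-- forward pass of Source B over zip(boiler, suf); returns (p, best)
def bGo : List (Int × (Int × Int)) → Nat → Int → Int → Option (Nat × Int) → Int × Option (Nat × Int)
  | [], _, p, _, best => (p, best)
  | (a, rs) :: rest, day, p, v, best =>
    let cost := p + rs.2 + v * rs.1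
    let best' := match best with
      | none => some (day, cost)
      | some bc => if cost < bc.2 then some (day, cost) else some bc
    let v' := if a ≠ 0 then (if day = 0 then a else a + v) else 0
    let p' := if a ≠ 0 then (if day = 0 then p + 1 else p + v') else p
    bGo rest (day + 1) p' v' best'

def solution_alt (boiler : List Int) : Int :=
  let r := bGo (boiler.zip (sufList boiler)) 0 0 0 none
  match r.2 with
  | some bc => if bc.2 < r.1 then (bc.1 : Int) + 1 else -1
  | none => -1

-- ===== PRECONDITION & SPEC =====
def Spec_solution (boiler : List Int) (out : Int) : Prop := out = solution_alt boiler
instance (boiler : List Int) (out : Int) : Decidable (Spec_solution boiler out) := by unfold Spec_solution; infer_instance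

-- ===== CLAIM (what is proved, stated in full; the proofs are below) =====
def Claim_equal_solution : Prop := ∀ (boiler : List Int), Dom_solution boiler → Spec_solution boiler (solution boiler)

-- ===== LEMMAS AND PROOFS =====

-- spec-level suffix quantities: r0 = leading zero-run length, s0 = inverted-suffix cost with zero carry
def r0 : List Int → Int
  | [] => 0
  | a :: xs => if a = 0 then r0 xs + 1 else 0

def s0 : List Int → Int
  | [] => 0
  | a :: xs => if a = 0 then s0 xs + 1 + r0 xs else s0 xs

-- proof-side names for the two inline matches of bGo / solution_alt
def stepB (d : Nat) (c : Int) : Option (Nat × Int) → Option (Nat × Int)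
  | none => some (d, c)
  | some bc => if c < bc.2 then some (d, c) else some bc

def outB (p : Int) : Option (Nat × Int) → Int
  | some bc => if bc.2 < p then (bc.1 : Int) + 1 else -1
  | none => -1

theorem bGo_cons (a : Int) (rs : Int × Int) (rest : List (Int × (Int × Int))) (day : Nat)
    (p v : Int) (best : Option (Nat × Int)) :
    bGo ((a, rs) :: rest) day p v best
      = bGo rest (day + 1)
          (if a ≠ 0 then (if day = 0 then p + 1 else p + (if a ≠ 0 then (if day = 0 then a else a + v) else 0)) else p)
          (if a ≠ 0 then (if day = 0 then a else a + v) else 0)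
          (stepB day (p + rs.2 + v * rs.1) best) := by
  cases best <;> rfl

theorem solution_alt_eq (boiler : List Int) :
    solution_alt boiler
      = outB (bGo (boiler.zip (sufList boiler)) 0 0 0 none).1
             (bGo (boiler.zip (sufList boiler)) 0 0 0 none).2 := by
  cases h : (bGo (boiler.zip (sufList boiler)) 0 0 0 none).2 <;>
    simp [solution_alt, h, outB]

theorem sufList_headD (l : List Int) : (sufList l).headD (0, 0) = (r0 l, s0 l) := by
  induction l with
  | nil => simp [sufList, r0, s0]
  | cons a xs ih =>
      simp only [sufList, List.headD_cons, ih, r0, s0]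
      by_cases h : a = 0 <;> simp [h]

theorem sufList_cons (a : Int) (xs : List Int) :
    sufList (a :: xs) = (r0 (a :: xs), s0 (a :: xs)) :: sufList xs := by
  simp only [sufList, sufList_headD, r0, s0]
  by_cases h : a = 0 <;> simp [h]

-- getCostGo on an inverted list is linear in the incoming carry
theorem getCostGo_inv (xs : List Int) : ∀ prev cost : Int,
    getCostGo (xs.map (fun a => if a = 0 then 1 else 0)) prev cost
      = cost + s0 xs + prev * r0 xs := by
  induction xs with
  | nil => intro prev cost; simp [getCostGo, r0, s0]
  | cons x t ih =>
      intro prev cost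
      by_cases h : x = 0
      · simp only [List.map_cons, h, getCostGo, r0, s0]
        norm_num [ih]; ring
      · simp only [List.map_cons, getCostGo, r0, s0, if_neg h]
        norm_num [ih]

theorem getCost_inv (l : List Int) :
    getCost (l.map (fun a => if a = 0 then 1 else 0)) = s0 l := by
  cases l with
  | nil => simp [getCost, s0]
  | cons a t =>
      by_cases h : a = 0
      · simp only [List.map_cons, h, getCost, getCostGo_inv, s0]
        norm_num; ring
      · simp only [List.map_cons, getCost, getCostGo_inv, s0, if_neg h]
        norm_num

-- the relation maintained between A's (min_day, min_cost) and B's best option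
def RelAB (oc : Int) (stA : Nat × Int) (best : Option (Nat × Int)) : Prop :=
  (best = none → stA = (0, oc)) ∧
  (∀ bd : Nat, ∀ bc : Int, best = some (bd, bc) →
    (bc < oc → stA = (bd, bc)) ∧ (oc ≤ bc → stA = (0, oc)))

-- one step of the min bookkeeping preserves RelAB
theorem RelAB_step (oc c : Int) (d : Nat) (stA : Nat × Int) (best : Option (Nat × Int))
    (h : RelAB oc stA best) :
    RelAB oc (if c < stA.2 then (d, c) else stA) (stepB d c best) := by
  obtain ⟨h0, hs⟩ := h
  cases best with
  | none =>
      have hA := h0 rfl; subst hA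
      refine ⟨fun hn => by simp [stepB] at hn, fun bd bc hbc => ?_⟩
      simp only [stepB, Option.some.injEq] at hbc
      cases hbc
      constructor
      · intro hlt; simp [hlt]
      · intro hge; simp [not_lt.mpr hge]
  | some bc0 =>
      obtain ⟨bd0, bv0⟩ := bc0
      have hsp := hs bd0 bv0 rfl
      refine ⟨fun hn => ?_, fun bd bc hbc => ?_⟩
      · by_cases hcb : c < bv0 <;> simp [stepB, hcb] at hn
      · simp only [stepB] at hbc
        by_cases hcb : c < bv0
        · rw [if_pos hcb, Option.some.injEq] at hbc
          cases hbc
          by_cases hlt : bv0 < oc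
          · have hA := hsp.1 hlt; subst hA
            exact ⟨fun _ => by simp [hcb],
              fun hge => absurd (lt_of_lt_of_le (lt_trans hcb hlt) hge) (lt_irrefl _)⟩
          · have hA := hsp.2 (not_lt.mp hlt); subst hA
            exact ⟨fun hlt2 => by simp [hlt2], fun hge2 => by simp [not_lt.mpr hge2]⟩
        · rw [if_neg hcb, Option.some.injEq] at hbc
          cases hbc
          by_cases hlt : bv0 < oc
          · have hA := hsp.1 hlt; subst hA
            exact ⟨fun _ => by simp [hcb],
              fun hge => absurd (lt_of_lt_of_le hlt hge) (lt_irrefl _)⟩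
          · have hA := hsp.2 (not_lt.mp hlt); subst hA
            have hnc : ¬ c < oc := fun hcl => hcb (lt_of_lt_of_le hcl (not_lt.mp hlt))
            exact ⟨fun hlt2 => absurd hlt2 hlt, fun _ => by simp [hnc]⟩

-- reading the final answers off matching end states
theorem RelAB_final (oc : Int) (stA : Nat × Int) (best : Option (Nat × Int))
    (h : RelAB oc stA best) :
    (if stA.2 ≠ oc then (stA.1 : Int) + 1 else -1) = outB oc best := by
  obtain ⟨h0, hs⟩ := h
  cases best with
  | none => have := h0 rfl; subst this; simp [outB]
  | some bc0 =>
      obtain ⟨bd0, bc0v⟩ := bc0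
      have hsp := hs bd0 bc0v rfl
      by_cases hlt : bc0v < oc
      · have := hsp.1 hlt; subst this
        simp [outB, hlt, ne_of_lt hlt]
      · have := hsp.2 (not_lt.mp hlt); subst this
        simp [outB, hlt]

-- the main loop correspondence, by induction on the unprocessed suffix
theorem main_loop (rest : List Int) : ∀ (done : List Int) (p v : Int)
    (stA : Nat × Int) (best : Option (Nat × Int)),
    1 ≤ done.length →
    (∀ l2 : List Int, getCost (done ++ l2) = getCostGo l2 v p) →
    RelAB (getCost (done ++ rest)) stA best →
    (if (aLoop (done ++ rest) done.length stA).2 ≠ getCost (done ++ rest)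
      then ((aLoop (done ++ rest) done.length stA).1 : Int) + 1 else -1)
      = outB (bGo (rest.zip (sufList rest)) done.length p v best).1
             (bGo (rest.zip (sufList rest)) done.length p v best).2 := by
  induction rest with
  | nil =>
      intro done p v stA best _ hpv hrel
      have hp : getCost (done ++ ([] : List Int)) = p := by
        simpa [getCostGo] using hpv []
      rw [aLoop]
      simp only [List.append_nil] at *
      rw [if_neg (lt_irrefl done.length)]
      simp only [List.zip_nil_left, bGo]
      rw [hp] at hrel ⊢
      exact RelAB_final p stA best hrel
  | cons a rest' ih =>
      intro done p v stA best hlen hpv hrel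
      have hpos : posA (done ++ a :: rest') done.length
          = done ++ (a :: rest').map (fun x => if x = 0 then 1 else 0) := by
        simp [posA]
      have hcost : getCost (posA (done ++ a :: rest') done.length)
          = p + s0 (a :: rest') + v * r0 (a :: rest') := by
        rw [hpos, hpv, getCostGo_inv]
      have hday : done.length < (done ++ a :: rest').length := by
        simp [List.length_append]
      rw [aLoop]
      rw [if_pos hday]
      rw [sufList_cons]
      simp only [List.zip_cons_cons]
      rw [bGo_cons]
      have hday0 : ¬ done.length = 0 := by omega
      set v' := if a ≠ 0 then (if done.length = 0 then a else a + v) else 0 with hv'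
      set p' := if a ≠ 0 then (if done.length = 0 then p + 1 else p + v') else p with hp'
      have hpv' : ∀ l2 : List Int, getCost ((done ++ [a]) ++ l2) = getCostGo l2 v' p' := by
        intro l2
        have hx := hpv (a :: l2)
        rw [List.append_assoc]
        simp only [List.cons_append, List.nil_append]
        rw [hx]
        by_cases ha : a = 0
        · simp [getCostGo, ha, hv', hp']
        · simp only [getCostGo, if_pos (show a ≠ 0 from ha)]
          simp [hv', hp', ha, hday0]
      have hlen' : 1 ≤ (done ++ [a]).length := by simp
      have heq : done ++ a :: rest' = (done ++ [a]) ++ rest' := by simp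
      have hrel' : RelAB (getCost ((done ++ [a]) ++ rest'))
          (if getCost (posA (done ++ a :: rest') done.length) < stA.2
            then (done.length, getCost (posA (done ++ a :: rest') done.length)) else stA)
          (stepB done.length (p + s0 (a :: rest') + v * r0 (a :: rest')) best) := by
        rw [← heq, hcost]
        exact RelAB_step _ _ _ _ _ hrel
      have hmain := ih (done ++ [a]) p' v'
          (if getCost (posA (done ++ a :: rest') done.length) < stA.2
            then (done.length, getCost (posA (done ++ a :: rest') done.length)) else stA)
          (stepB done.length (p + s0 (a :: rest') + v * r0 (a :: rest')) best)
          hlen' hpv' hrel'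
      rw [← heq] at hmain
      simp only [List.length_append, List.length_singleton] at hmain
      exact hmain

-- peel off day 0 (both loops treat the first element specially)
theorem solution_eq (boiler : List Int) : solution boiler = solution_alt boiler := by
  rw [solution_alt_eq]
  cases boiler with
  | nil => simp [solution, aLoop, getCost, bGo, sufList, outB]
  | cons a xs =>
      simp only [solution]
      rw [aLoop]
      rw [if_pos (by simp : 0 < (a :: xs).length)]
      rw [sufList_cons]
      simp only [List.zip_cons_cons]
      rw [bGo_cons]
      have hpos0 : posA (a :: xs) 0 = (a :: xs).map (fun x => if x = 0 then 1 else 0) := by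
        simp [posA]
      have hcost0 : getCost (posA (a :: xs) 0) = 0 + s0 (a :: xs) + 0 * r0 (a :: xs) := by
        rw [hpos0, getCost_inv]; ring
      set v1 := if a ≠ 0 then (if (0 : Nat) = 0 then a else a + 0) else 0 with hv1
      set p1 := if a ≠ 0 then (if (0 : Nat) = 0 then (0 : Int) + 1
          else 0 + (if a ≠ 0 then (if (0 : Nat) = 0 then a else a + 0) else 0)) else 0 with hp1
      have hpv1 : ∀ l2 : List Int, getCost ([a] ++ l2) = getCostGo l2 v1 p1 := by
        intro l2
        by_cases ha : a = 0 <;> simp [getCost, ha, hv1, hp1]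
      have hrel1 : RelAB (getCost ([a] ++ xs))
          (if getCost (posA (a :: xs) 0) < getCost (a :: xs) then (0, getCost (posA (a :: xs) 0))
            else ((0 : Nat), getCost (a :: xs)))
          (stepB 0 (0 + s0 (a :: xs) + 0 * r0 (a :: xs)) none) := by
        have hh : getCost ([a] ++ xs) = getCost (a :: xs) := by simp
        rw [hh, ← hcost0]
        exact RelAB_step _ _ _ _ _ ⟨fun _ => rfl, by simp⟩
      have hmain := main_loop xs [a] p1 v1
          (if getCost (posA (a :: xs) 0) < getCost (a :: xs) then (0, getCost (posA (a :: xs) 0))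
            else ((0 : Nat), getCost (a :: xs)))
          (stepB 0 (0 + s0 (a :: xs) + 0 * r0 (a :: xs)) none)
          (by simp) hpv1 hrel1
      simp only [List.length_singleton, List.singleton_append] at hmain
      exact hmain

-- ===== VERDICT (by name: the statement is the Claim_ definition above) =====
theorem solution_spec : Claim_equal_solution := by
  intro boiler _
  unfold Spec_solution
  exact solution_eq boiler
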